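-- pv_equiv track=rewrite | github.com/zyph-parth/scheduleai | backend/main.py | _slot_fits_schedule
-- ===== SOURCE A (Python) =====
-- from typing import Any, Dict, List, Optional
--
-- def _slot_fits_schedule(
--     day: int,
--     period: int,
--     duration: int,
--     working_days: List[int],
--     periods_per_day: Dict[str, List[int]],
-- ) -> bool:
--     if day not in working_days:
--         return False
--
--     valid_periods = sorted(int(item) for item in (periods_per_day.get(str(day), []) or []))
--     if period not in valid_periods:
--         return False
--
--     length = max(int(duration or 1), 1)
--     start_index = valid_periods.index(period)
--     return len(valid_periods[start_index:start_index + length]) == length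
-- ===== SOURCE B (Python) =====
-- def _slot_fits_schedule(day, period, duration, working_days, periods_per_day):
--     found = False
--     tail = 0
--     for x in periods_per_day.get(str(day), []):
--         p = int(x)
--         if p == period:
--             found = True
--         if p >= period:
--             tail += 1
--     need = max(int(duration or 1), 1)
--     return day in working_days and found and tail >= need
-- ===== Notes on version B (the rewrite author's own statement) =====
-- stated objective: alternative
-- what changed: Replaced A's sort + first-index + slice-length pipeline by one accumulator loop over the day's periods that simultaneously records whether `period` occurs and counts the periods >= `period`, then returns a single conjunction; correct because the tail of the sorted list from the first occurrence of `period` has exactly as many elements as there are periods >= `period`.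
import Mathlib
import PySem

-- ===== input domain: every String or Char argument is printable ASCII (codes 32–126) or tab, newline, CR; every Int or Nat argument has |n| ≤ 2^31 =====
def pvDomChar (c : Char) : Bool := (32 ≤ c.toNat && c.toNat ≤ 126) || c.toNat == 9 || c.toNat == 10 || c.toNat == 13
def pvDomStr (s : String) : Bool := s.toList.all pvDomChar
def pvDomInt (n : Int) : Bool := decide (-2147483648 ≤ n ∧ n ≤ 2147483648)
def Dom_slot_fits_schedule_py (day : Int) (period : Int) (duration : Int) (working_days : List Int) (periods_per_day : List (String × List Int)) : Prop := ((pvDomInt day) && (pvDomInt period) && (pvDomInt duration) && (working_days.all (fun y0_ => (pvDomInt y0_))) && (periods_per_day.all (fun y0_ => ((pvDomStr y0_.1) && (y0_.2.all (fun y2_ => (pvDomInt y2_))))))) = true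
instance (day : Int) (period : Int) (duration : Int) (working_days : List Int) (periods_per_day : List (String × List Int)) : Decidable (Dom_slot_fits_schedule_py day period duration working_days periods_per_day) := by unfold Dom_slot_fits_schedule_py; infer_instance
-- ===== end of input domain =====

-- B replaces A's sort + first-index + slice-length pipeline by one accumulator loop that
-- records membership of `period` and counts the periods ≥ `period`, returned as one
-- conjunction; objective: alternative.

-- ===== PORT A =====
def slot_fits_schedule_py (day : Int) (period : Int) (duration : Int) (working_days : List Int) (periods_per_day : List (String × List Int)) : Bool :=
  if !(working_days.contains day) then false
  else
    -- periods_per_day.get(str(day), []) or []  (a falsy empty list is replaced by [])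
    let raw := PySem.Dict.getD (PySem.Dict.mk periods_per_day) (PySem.Int.toStr day) []
    let raw := if raw = [] then [] else raw
    -- sorted(int(item) for item in …): int(item) is the identity on ints
    let valid_periods := PySem.List.sorted (raw.map (fun item => item)) (fun x => x) false
    if !(valid_periods.contains period) then false
    else
      let length : Int := max (if duration = 0 then 1 else duration) 1
      match PySem.List.index? valid_periods period with
      | none => false   -- unreachable: membership was just checked (Python .index would raise)
      | some start_index =>
        ((PySem.List.slice valid_periods (some (start_index : Int)) (some ((start_index : Int) + length))).length : Int) == length

-- ===== PORT B =====
-- one fold over the day's periods: st.1 = "period seen so far", st.2 = count of elements ≥ period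
def slot_fits_schedule_py_alt (day : Int) (period : Int) (duration : Int) (working_days : List Int) (periods_per_day : List (String × List Int)) : Bool :=
  let st : Bool × Int :=
    (PySem.Dict.getD (PySem.Dict.mk periods_per_day) (PySem.Int.toStr day) []).foldl
      (fun st p =>
        (if p == period then true else st.1,
         if period ≤ p then st.2 + 1 else st.2))
      (false, 0)
  let need : Int := max (if duration = 0 then 1 else duration) 1
  working_days.contains day && st.1 && decide (need ≤ st.2)

-- ===== PRECONDITION & SPEC =====
def Spec_slot_fits_schedule_py (day : Int) (period : Int) (duration : Int) (working_days : List Int) (periods_per_day : List (String × List Int)) (out : Bool) : Prop := out = slot_fits_schedule_py_alt day period duration working_days periods_per_day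
instance (day : Int) (period : Int) (duration : Int) (working_days : List Int) (periods_per_day : List (String × List Int)) (out : Bool) : Decidable (Spec_slot_fits_schedule_py day period duration working_days periods_per_day out) := by unfold Spec_slot_fits_schedule_py; infer_instance

-- ===== CLAIM =====
def Claim_equal_slot_fits_schedule_py : Prop := ∀ (day : Int) (period : Int) (duration : Int) (working_days : List Int) (periods_per_day : List (String × List Int)), Dom_slot_fits_schedule_py day period duration working_days periods_per_day → Spec_slot_fits_schedule_py day period duration working_days periods_per_day (slot_fits_schedule_py day period duration working_days periods_per_day)

-- ===== LEMMAS AND PROOFS =====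

-- B's accumulator loop computes (membership of v, count of elements ≥ v).
lemma fold_pair_eq (v : Int) (l : List Int) (b : Bool) (n : Int) :
    l.foldl (fun (st : Bool × Int) p =>
        (if p == v then true else st.1, if v ≤ p then st.2 + 1 else st.2)) (b, n)
      = (b || l.contains v, n + (l.countP (fun p => decide (v ≤ p)) : Int)) := by
  induction l generalizing b n with
  | nil => simp
  | cons h t ih =>
    simp only [List.foldl_cons, List.countP_cons, ih]
    by_cases hv : h = v <;> by_cases hle : v ≤ h <;>
      simp [hv, hle, eq_comm (a := v) (b := h)] <;> omega

-- In a ≤-sorted list whose first occurrence of v sits at index i, the elements ≥ v are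
-- exactly the tail from i: countP (v ≤ ·) = length - i.
lemma countP_ge_of_sorted_index (s : List Int) (v : Int) (hs : s.Pairwise (· ≤ ·)) (i : Nat)
    (hi : PySem.List.index? s v = some i) :
    s.countP (fun p => decide (v ≤ p)) = s.length - i ∧ i ≤ s.length := by
  obtain ⟨pre, suf, rfl, hlen, hnot⟩ := ((PySem.List.index?_eq_some_iff _ _ _).mp hi)
  rw [List.pairwise_append] at hs
  have hpre : pre.countP (fun p => decide (v ≤ p)) = 0 := by
    rw [List.countP_eq_zero]
    intro a ha
    have h1 : a ≤ v := hs.2.2 a ha v (by simp)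
    have h2 : a ≠ v := fun h => hnot (h ▸ ha)
    simp; omega
  have hsuf : (v :: suf).countP (fun p => decide (v ≤ p)) = suf.length + 1 := by
    rw [List.countP_cons]
    have : suf.countP (fun p => decide (v ≤ p)) = suf.length := by
      rw [List.countP_eq_length]
      intro x hx
      have := List.rel_of_pairwise_cons hs.2.1 hx
      simpa using this
    simp [this]
  constructor
  · rw [List.countP_append, hpre, hsuf]
    simp [List.length_append]; omega
  · simp [List.length_append]; omega

theorem slot_fits_schedule_py_spec : Claim_equal_slot_fits_schedule_py := by
  intro day period duration working_days periods_per_day _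
  unfold Spec_slot_fits_schedule_py slot_fits_schedule_py slot_fits_schedule_py_alt
  set raw0 := PySem.Dict.getD (PySem.Dict.mk periods_per_day) (PySem.Int.toStr day) [] with hraw0
  rw [fold_pair_eq]
  simp only [Bool.false_or]
  by_cases hd : working_days.contains day
  · simp only [hd, Bool.not_true, Bool.false_eq_true, if_false, Bool.true_and]
    have hpd : (if raw0 = [] then ([] : List Int) else raw0) = raw0 := by
      split <;> simp_all
    have hmapid : List.map (fun x : Int => x) raw0 = raw0 := by simp
    rw [hpd, hmapid]
    set s := PySem.List.sorted raw0 (fun x : Int => x) false with hsdef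
    have hperm : s.Perm raw0 := PySem.List.sorted_perm ..
    by_cases hm : period ∈ raw0
    · have hcs : s.contains period = true := by simp [hperm.mem_iff, hm]
      have hcr : raw0.contains period = true := by simpa using hm
      simp only [hcs, hcr, Bool.not_true, Bool.false_eq_true, if_false, Bool.true_and]
      have hms : period ∈ s := hperm.mem_iff.mpr hm
      obtain ⟨i, hi⟩ := Option.isSome_iff_exists.mp ((PySem.List.index?_isSome_iff ..).mpr hms)
      rw [hi]
      set L : Int := max (if duration = 0 then 1 else duration) 1 with hLdef
      have hL1 : 1 ≤ L := le_max_right _ _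
      have hpair : s.Pairwise (· ≤ ·) := by
        have := PySem.List.sorted_pairwise (xs := raw0) (key := fun x : Int => x)
        simpa using this
      obtain ⟨hcnt, hile⟩ := countP_ge_of_sorted_index s period hpair i hi
      have hred : (match some i with
        | none => false
        | some start_index => (((PySem.List.slice s (some (start_index : Int)) (some ((start_index : Int) + L))).length : Int) == L)) = (((PySem.List.slice s (some (i : Int)) (some ((i : Int) + L))).length : Int) == L) := rfl
      rw [hred]
      have hcnt' : raw0.countP (fun p => decide (period ≤ p)) = s.length - i :=
        (hperm.countP_eq _).symm.trans hcnt
      have hbnd : (i : Int) + L = (((i + L.toNat : Nat)) : Int) := by push_cast; omega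
      rw [hbnd, PySem.List.slice_natCast]
      rw [show (s.drop i).take (i + L.toNat - i) = (s.drop i).take L.toNat by congr 1; omega]
      have hlenslice : ((s.drop i).take L.toNat).length = min (L.toNat) (s.length - i) := by
        simp [List.length_take, List.length_drop]
      rw [hlenslice, hcnt']
      rw [Bool.eq_iff_iff]
      simp only [beq_iff_eq, decide_eq_true_eq]
      constructor
      · intro h; omega
      · intro h
        have : min L.toNat (s.length - i) = L.toNat := by omega
        rw [this]; omega
    · have hcs : s.contains period = false := by simp [hperm.mem_iff, hm]
      have hcr : raw0.contains period = false := by simpa using hm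
      simp only [hcs, hcr, Bool.not_false, if_true, Bool.false_and]
  · have hd' : working_days.contains day = false := by simpa using hd
    simp only [hd', Bool.not_false, if_true, Bool.false_and]
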